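-- pv_equiv track=rewrite | github.com/Yescrypt/ProbeSuite | app/information_gathering/osint/exiftool.py | format_metadata_for_report
-- ===== SOURCE A (Python) =====
-- def format_metadata_for_report(metadata):
--     """Format metadata for txt report"""
--     content = ""
--
--     # Organize by category
--     categories = {}
--     for key, value in metadata.items():
--         if ':' in key:
--             category = key.split(':')[0]
--         else:
--             category = 'General'
--
--         if category not in categories:
--             categories[category] = {}
--         categories[category][key] = value
--
--     # Format organized data
--     for category, fields in sorted(categories.items()):
--         content += f"\n{'■' * 3} {category.upper()} {'■' * 3}\n"
--         content += "-" * 80 + "\n\n"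
--
--         for key, value in sorted(fields.items()):
--             display_key = key.split(':')[-1] if ':' in key else key
--             value_str = str(value)
--             content += f"{display_key:35} {value_str}\n"
--
--         content += "\n"
--
--     return content
-- ===== SOURCE B (Python) =====
-- def format_metadata_for_report(metadata):
--     """Format metadata for txt report"""
--     # One pass: sort (category, key, value) triples once, then emit groups in a
--     # single scan, starting a new section whenever the category changes.
--     items = sorted(
--         ((key.split(':')[0] if ':' in key else 'General'), key, value)
--         for key, value in metadata.items()
--     )
--     out = []
--     prev = None
--     for category, key, value in items:
--         if prev != category:
--             if prev is not None:
--                 out.append("\n")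
--             out.append(f"\n{'■' * 3} {category.upper()} {'■' * 3}\n")
--             out.append("-" * 80 + "\n\n")
--             prev = category
--         display_key = key.split(':')[-1] if ':' in key else key
--         out.append(f"{display_key:35} {value}\n")
--     if prev is not None:
--         out.append("\n")
--     return "".join(out)
-- ===== Notes on version B (the rewrite author's own statement) =====
-- stated objective: alternative
-- what changed: B drops A's nested category->fields dict and its per-category sorts: it sorts (category, key, value) triples once and emits the report in a single linear pass that starts a new section whenever the category changes.
import Mathlib
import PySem

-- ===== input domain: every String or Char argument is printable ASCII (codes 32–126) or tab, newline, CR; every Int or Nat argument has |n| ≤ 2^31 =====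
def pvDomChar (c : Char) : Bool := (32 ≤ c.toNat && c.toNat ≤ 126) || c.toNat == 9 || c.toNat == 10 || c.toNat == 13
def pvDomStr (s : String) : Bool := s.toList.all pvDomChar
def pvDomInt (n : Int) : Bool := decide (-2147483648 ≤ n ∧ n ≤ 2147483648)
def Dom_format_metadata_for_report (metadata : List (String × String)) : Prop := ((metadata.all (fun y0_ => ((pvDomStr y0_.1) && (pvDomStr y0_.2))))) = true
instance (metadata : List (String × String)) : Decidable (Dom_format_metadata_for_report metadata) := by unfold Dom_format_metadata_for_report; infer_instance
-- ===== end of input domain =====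

-- B replaces A's nested category→fields dicts and per-category double sort by one
-- global sort of (category, key, value) triples and a single linear emit pass
-- (objective: alternative decomposition; same asymptotic cost).


-- Helpers shared by both ports (both Pythons compute these very expressions).
-- category = key.split(':')[0] if ':' in key else 'General'
def pvCat (k : String) : String :=
  if PySem.Str.isIn ":" k then ((PySem.Str.split? k ":").getD []).headD "" else "General"
-- display_key = key.split(':')[-1] if ':' in key else key
def pvDisp (k : String) : String :=
  if PySem.Str.isIn ":" k then ((PySem.Str.split? k ":").getD []).getLastD "" else k
-- f"{display_key:35} {value_str}\n"  (left-justify to width 35 with spaces; no pad when already ≥ 35)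
def pvLine (k v : String) : String :=
  pvDisp k ++ String.ofList (List.replicate (35 - PySem.Str.len (pvDisp k)).toNat ' ') ++ " " ++ v ++ "\n"
-- f"\n{'■' * 3} {category.upper()} {'■' * 3}\n" + "-" * 80 + "\n\n"
def pvHeader (c : String) : String :=
  "\n■■■ " ++ PySem.Str.upper c ++ " ■■■\n" ++ String.ofList (List.replicate 80 '-') ++ "\n\n"

-- ===== PORT A =====
def format_metadata_for_report (metadata : List (String × String)) : String :=
  -- "if category not in categories: categories[category] = {}" followed by
  -- "categories[category][key] = value" is exactly d[c] = d.get(c, {}) updated — Dict.modify.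
  let categories : PySem.Dict String (PySem.Dict String String) :=
    metadata.foldl
      (fun d kv => d.modify (pvCat kv.1) PySem.Dict.empty (fun fields => fields.insert kv.1 kv.2))
      PySem.Dict.empty
  -- sorted(categories.items()): the category keys are distinct, so Python's tuple sort
  -- never compares the (unorderable) dict values — sorting by the key is exact.
  (PySem.List.sorted categories.items (fun p => p.1)).foldl
    (fun content p =>
      -- sorted(fields.items()) compares (key, value) tuples — modelled by sorted2.
      ((PySem.List.sorted2 p.2.items (fun q => q.1) (fun q => q.2)).foldl
          (fun content q => content ++ pvLine q.1 q.2)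
          (content ++ pvHeader p.1)) ++ "\n")
    ""

-- ===== PORT B =====
-- The state of B's single emit pass: (output so far, category of the previous item).
def pvStep (acc : String × Option String) (t : String × String × String) : String × Option String :=
  let acc :=
    if acc.2 ≠ some t.1 then
      ((if acc.2 = none then acc.1 else acc.1 ++ "\n") ++ pvHeader t.1, some t.1)
    else acc
  (acc.1 ++ pvLine t.2.1 t.2.2, acc.2)

def format_metadata_for_report_alt (metadata : List (String × String)) : String :=
  -- sorted((category, key, value) triples): inside Pre_ the keys are distinct, so the
  -- value component of the 3-tuple is never compared — sorting by (category, key) is exact.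
  let items : List (String × String × String) :=
    PySem.List.sorted2 (metadata.map (fun kv => (pvCat kv.1, kv.1, kv.2)))
      (fun t => t.1) (fun t => t.2.1)
  let r : String × Option String := items.foldl pvStep ("", none)
  if r.2 = none then r.1 else r.1 ++ "\n"

-- ===== PRECONDITION & SPEC =====
-- Pre_ excludes association lists with duplicate keys: they do not represent a Python
-- dict (A's dict argument has already collapsed duplicates before the call), so any
-- behaviour on them is an artefact of the list representation.
def Pre_format_metadata_for_report (metadata : List (String × String)) : Prop :=
  (metadata.map Prod.fst).Nodup
instance (metadata : List (String × String)) : Decidable (Pre_format_metadata_for_report metadata) := by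
  unfold Pre_format_metadata_for_report; infer_instance

def pvWitness_format_metadata_for_report : (List (String × String)) :=
  [("File:FileName", "a.txt"), ("ImageSize", "640x480"), ("File:FileSize", "10 kB")]

def Spec_format_metadata_for_report (metadata : List (String × String)) (out : String) : Prop := out = format_metadata_for_report_alt metadata
instance (metadata : List (String × String)) (out : String) : Decidable (Spec_format_metadata_for_report metadata out) := by unfold Spec_format_metadata_for_report; infer_instance

-- ===== CLAIM (what is proved, stated in full; the proofs are below) =====
def Claim_equal_format_metadata_for_report : Prop := ∀ (metadata : List (String × String)), Dom_format_metadata_for_report metadata → Pre_format_metadata_for_report metadata → Spec_format_metadata_for_report metadata (format_metadata_for_report metadata)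

-- ===== LEMMAS AND PROOFS =====

-- The canonical grouped form both outputs are reduced to:
-- categories in sorted order, each with its key-sorted member pairs.
def pvCats (l : List (String × String)) : List String :=
  PySem.List.sorted (PySem.Set.ofList (l.map (fun kv => pvCat kv.1))) (fun c => c)
def pvGroup (l : List (String × String)) (c : String) : List (String × String) :=
  PySem.List.sorted (l.filter (fun kv => pvCat kv.1 == c)) (fun kv => kv.1)
def pvLines (kvs : List (String × String)) : String :=
  kvs.foldl (fun s kv => s ++ pvLine kv.1 kv.2) ""
-- A's rendering (block-trailing "\n") and B's rendering (block-leading "\n") of the groups.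
def pvAr : List (String × List (String × String)) → String
  | [] => ""
  | (c, kvs) :: t => pvHeader c ++ pvLines kvs ++ "\n" ++ pvAr t
def pvBr : List (String × List (String × String)) → String
  | [] => ""
  | (c, kvs) :: t => "\n" ++ pvHeader c ++ pvLines kvs ++ pvBr t

theorem pvLines_acc (kvs : List (String × String)) (s : String) :
    kvs.foldl (fun s kv => s ++ pvLine kv.1 kv.2) s = s ++ pvLines kvs := by
  induction kvs generalizing s with
  | nil => simp [pvLines]
  | cons kv t ih =>
    simp only [pvLines, List.foldl_cons]
    rw [ih, ih ("" ++ pvLine kv.1 kv.2)]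
    simp [String.append_assoc]

theorem pvLines_cons (kv : String × String) (t : List (String × String)) :
    pvLines (kv :: t) = pvLine kv.1 kv.2 ++ pvLines t := by
  show (kv :: t).foldl (fun s kv => s ++ pvLine kv.1 kv.2) "" = _
  rw [List.foldl_cons, pvLines_acc]
  simp

-- sorted2 is sorted by the lexicographic pair key.
theorem pv_sorted2_eq_sorted_lex {α κ₁ κ₂ : Type} [LinearOrder κ₁] [LinearOrder κ₂]
    (xs : List α) (k1 : α → κ₁) (k2 : α → κ₂) :
    PySem.List.sorted2 xs k1 k2 = PySem.List.sorted xs (fun a => toLex (k1 a, k2 a)) := by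
  rw [PySem.List.sorted_eq_foldl_insertBy]
  unfold PySem.List.sorted2
  simp only [if_neg (by decide : ¬ (false = true))]
  congr 1
  funext acc x
  congr 1
  funext a b
  rcases lt_trichotomy (k1 a) (k1 b) with h | h | h
  · simp [Prod.Lex.lt_iff, h, h.ne, lt_asymm h]
  · simp [Prod.Lex.lt_iff, h]
  · simp [Prod.Lex.lt_iff, h, h.ne', lt_asymm h]

-- The grouping loop: each category's inner dict holds exactly the matching pairs, in order.
theorem pv_getD_group (l : List (String × String))
    (d : PySem.Dict String (PySem.Dict String String))
    (hfresh : ∀ kv ∈ l, ∀ c', ((d.getD c' PySem.Dict.empty).contains kv.1) = false)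
    (hnod : (l.map Prod.fst).Nodup) (c : String) :
    ((l.foldl (fun d kv => d.modify (pvCat kv.1) PySem.Dict.empty
        (fun fields => fields.insert kv.1 kv.2)) d).getD c PySem.Dict.empty).items
      = (d.getD c PySem.Dict.empty).items ++ l.filter (fun kv => pvCat kv.1 == c) := by
  induction l generalizing d with
  | nil => simp
  | cons kv t ih =>
    simp only [List.foldl_cons, List.filter_cons]
    have hkvfresh := hfresh kv (by simp)
    rw [List.map_cons, List.nodup_cons] at hnod
    have hnodt : (t.map Prod.fst).Nodup := hnod.2
    have hne : ∀ kv' ∈ t, kv'.1 ≠ kv.1 := by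
      intro kv' h' he
      exact hnod.1 (he ▸ (List.mem_map_of_mem h'))
    rw [ih _ ?_ hnodt]
    · rw [PySem.Dict.getD_modify]
      by_cases hc : c = pvCat kv.1
      · rw [if_pos hc, PySem.Dict.items_insert_of_not_contains _ _ (hkvfresh _)]
        simp [hc, List.append_assoc]
      · rw [if_neg hc]
        have : (pvCat kv.1 == c) = false := by simp [Ne.symm hc]
        simp [this]
    · intro kv' h' c'
      rw [PySem.Dict.getD_modify]
      by_cases hc : c' = pvCat kv.1
      · rw [if_pos hc, PySem.Dict.contains_insert]
        simp [hne kv' h', hfresh kv' (by simp [h']) (pvCat kv.1)]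
      · rw [if_neg hc]; exact hfresh kv' (by simp [h']) c'

theorem pv_categories_items (l : List (String × String))
    (hnod : (l.map Prod.fst).Nodup) (c : String) :
    ((l.foldl (fun d kv => d.modify (pvCat kv.1) PySem.Dict.empty
        (fun fields => fields.insert kv.1 kv.2)) PySem.Dict.empty).getD c PySem.Dict.empty).items
      = l.filter (fun kv => pvCat kv.1 == c) := by
  rw [pv_getD_group l PySem.Dict.empty (by simp) hnod c]
  have h0 : ((PySem.Dict.empty : PySem.Dict String (PySem.Dict String String)).getD c
      PySem.Dict.empty).items = [] := rfl
  rw [h0, List.nil_append]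

theorem pv_categories_keys (l : List (String × String)) :
    (l.foldl (fun d kv => d.modify (pvCat kv.1) PySem.Dict.empty
        (fun fields => fields.insert kv.1 kv.2)) PySem.Dict.empty).keys
      = PySem.Set.ofList (l.map (fun kv => pvCat kv.1)) := by
  rw [PySem.Dict.keys_foldl_modify_key l (fun kv => pvCat kv.1) PySem.Dict.empty
      (fun _ kv fields => fields.insert kv.1 kv.2) PySem.Dict.empty]
  exact PySem.Set.update_empty _

theorem pvCats_pairwise (l : List (String × String)) : (pvCats l).Pairwise (· < ·) :=
  PySem.List.sorted_ofList_pairwise_lt _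

-- Within a category the key-sorted members have strictly increasing keys (keys are unique).
theorem pv_group_pairwise_lt (l : List (String × String))
    (h : Pre_format_metadata_for_report l) (c : String) :
    (pvGroup l c).Pairwise (fun a b => a.1 < b.1) := by
  have hle : (pvGroup l c).Pairwise (fun a b => a.1 ≤ b.1) := PySem.List.sorted_pairwise _ _
  have hndf : ((l.filter (fun kv => pvCat kv.1 == c)).map Prod.fst).Nodup :=
    List.Nodup.sublist (List.Sublist.map Prod.fst List.filter_sublist) h
  have hnd : ((pvGroup l c).map Prod.fst).Nodup :=
    ((List.Perm.map Prod.fst (PySem.List.sorted_perm _ _ _)).nodup_iff).mpr hndf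
  have hne : (pvGroup l c).Pairwise (fun a b => a.1 ≠ b.1) := List.pairwise_map.mp hnd
  exact (hle.and hne).imp (fun hab => lt_of_le_of_ne hab.1 hab.2)

-- A's inner sort of a category's items is the canonical key-sorted group.
theorem pv_sorted2_filter (l : List (String × String))
    (h : Pre_format_metadata_for_report l) (c : String) :
    PySem.List.sorted2 (l.filter (fun kv => pvCat kv.1 == c)) (fun q => q.1) (fun q => q.2)
      = pvGroup l c := by
  rw [pv_sorted2_eq_sorted_lex]
  refine PySem.List.sorted_eq_of_perm_of_pairwise_lt _ _ _ (PySem.List.sorted_perm _ _ _) ?_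
  exact (pv_group_pairwise_lt l h c).imp (fun hab => by
    rw [Prod.Lex.lt_iff]; exact Or.inl hab)

-- A's outer sort is the sorted category list paired with the per-category dicts.
theorem pv_outer_sorted (l : List (String × String)) :
    PySem.List.sorted
      (l.foldl (fun d kv => d.modify (pvCat kv.1) PySem.Dict.empty
          (fun fields => fields.insert kv.1 kv.2)) PySem.Dict.empty).items (fun p => p.1)
      = (pvCats l).map (fun c => (c,
          (l.foldl (fun d kv => d.modify (pvCat kv.1) PySem.Dict.empty
            (fun fields => fields.insert kv.1 kv.2)) PySem.Dict.empty).getD c PySem.Dict.empty)) := by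
  have hkeys := pv_categories_keys l
  have hnodk : (l.foldl (fun d kv => d.modify (pvCat kv.1) PySem.Dict.empty
      (fun fields => fields.insert kv.1 kv.2)) PySem.Dict.empty).keys.Nodup := by
    rw [hkeys]; exact PySem.Set.nodup_ofList _
  refine PySem.List.sorted_eq_of_perm_of_pairwise_lt _ _ _ ?_ ?_
  · rw [PySem.Dict.items_eq_map_keys _ hnodk PySem.Dict.empty, hkeys]
    exact List.Perm.map _ (PySem.List.sorted_perm _ _ _)
  · exact List.pairwise_map.mpr (pvCats_pairwise l)

-- A's double fold over grouped data renders pvAr.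
theorem pv_foldA (cats : List String) (G : String → List (String × String)) (s : String) :
    cats.foldl (fun content c =>
        ((G c).foldl (fun content q => content ++ pvLine q.1 q.2) (content ++ pvHeader c)) ++ "\n") s
      = s ++ pvAr (cats.map (fun c => (c, G c))) := by
  induction cats generalizing s with
  | nil => simp [pvAr]
  | cons c t ih =>
    simp only [List.foldl_cons, List.map_cons, pvAr]
    rw [pvLines_acc, ih]
    simp [String.append_assoc]

theorem pv_A_eq_Ar (l : List (String × String)) (h : Pre_format_metadata_for_report l) :
    format_metadata_for_report l = pvAr ((pvCats l).map (fun c => (c, pvGroup l c))) := by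
  show (PySem.List.sorted
      (l.foldl (fun d kv => d.modify (pvCat kv.1) PySem.Dict.empty
        (fun fields => fields.insert kv.1 kv.2)) PySem.Dict.empty).items (fun p => p.1)).foldl
      (fun content p =>
        ((PySem.List.sorted2 p.2.items (fun q => q.1) (fun q => q.2)).foldl
            (fun content q => content ++ pvLine q.1 q.2)
            (content ++ pvHeader p.1)) ++ "\n") "" = _
  rw [pv_outer_sorted l, List.foldl_map]
  simp only [pv_categories_items l h, pv_sorted2_filter l h]
  exact pv_foldA (pvCats l) (pvGroup l) ""

-- ===== B side =====

theorem pv_flatMap_perm {α β : Type} (cs : List α) (F F' : α → List β)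
    (h : ∀ c ∈ cs, (F c).Perm (F' c)) : (cs.flatMap F).Perm (cs.flatMap F') := by
  induction cs with
  | nil => simp
  | cons c t ih =>
    simp only [List.flatMap_cons]
    exact (h c (by simp)).append (ih (fun c' h' => h c' (by simp [h'])))

theorem pv_map_filter_triple (l : List (String × String)) (c : String) :
    (l.filter (fun kv => pvCat kv.1 == c)).map (fun kv => (c, kv.1, kv.2))
      = (l.filter (fun kv => pvCat kv.1 == c)).map (fun kv => (pvCat kv.1, kv.1, kv.2)) := by
  refine List.map_congr_left (fun kv hkv => ?_)
  have := (List.mem_filter.mp hkv).2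
  rw [beq_iff_eq] at this
  rw [this]

theorem pv_partition_perm (key : (String × String) → String) :
    ∀ (cs : List String) (l : List (String × String)), cs.Nodup →
      (∀ kv ∈ l, key kv ∈ cs) →
      (cs.flatMap (fun c => l.filter (fun kv => key kv == c))).Perm l := by
  intro cs
  induction cs with
  | nil =>
    intro l _ hcov
    have : l = [] := by
      cases l with
      | nil => rfl
      | cons kv t => exact absurd (hcov kv (by simp)) (by simp)
    simp [this]
  | cons c t ih =>
    intro l hnod hcov
    rw [List.nodup_cons] at hnod
    simp only [List.flatMap_cons]
    have hrw : t.map (fun c' => l.filter (fun kv => key kv == c'))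
        = t.map (fun c' => (l.filter (fun kv => !(key kv == c))).filter (fun kv => key kv == c')) := by
      refine List.map_congr_left (fun c' hc' => ?_)
      rw [List.filter_filter]
      refine (List.filter_congr (fun kv _ => ?_)).symm
      by_cases hk : key kv = c'
      · have hcc : (key kv == c) = false := by
          refine beq_eq_false_iff_ne.mpr (fun he => ?_)
          exact hnod.1 ((hk.symm.trans he) ▸ hc')
        simp [hk]
        intro he
        exact hnod.1 (he ▸ hc')
      · simp [hk]
    have hcov' : ∀ kv ∈ l.filter (fun kv => !(key kv == c)), key kv ∈ t := by
      intro kv hkv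
      rcases List.mem_filter.mp hkv with ⟨hm, hf⟩
      have := hcov kv hm
      simp only [List.mem_cons] at this
      rcases this with h1 | h1
      · exact absurd h1 (by simpa using hf)
      · exact h1
    rw [List.flatMap_def, hrw, ← List.flatMap_def]
    exact List.Perm.trans
      (List.Perm.append_left _ (ih _ hnod.2 hcov'))
      (List.filter_append_perm _ l)

theorem pv_group_ne_nil (l : List (String × String)) (c : String)
    (hc : c ∈ pvCats l) : pvGroup l c ≠ [] := by
  rw [pvCats, PySem.List.mem_sorted, PySem.Set.mem_ofList] at hc
  rcases List.mem_map.mp hc with ⟨kv, hkv, hrfl⟩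
  intro hnil
  rw [pvGroup, PySem.List.sorted_eq_nil_iff] at hnil
  have : kv ∈ l.filter (fun kv => pvCat kv.1 == c) :=
    List.mem_filter.mpr ⟨hkv, by simp [hrfl]⟩
  rw [hnil] at this
  exact absurd this (List.not_mem_nil)

-- B's sorted triple list is the grouped canonical form, flattened.
theorem pv_flat_pairwise (G : String → List (String × String))
    (hG : ∀ c, (G c).Pairwise (fun a b => a.1 < b.1)) :
    ∀ cs : List String, cs.Pairwise (· < ·) →
    (cs.flatMap (fun c => (G c).map (fun kv => (c, kv.1, kv.2)))).Pairwise
      (fun a b => (fun t : String × String × String => toLex (t.1, t.2.1)) a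
        < (fun t : String × String × String => toLex (t.1, t.2.1)) b) := by
  intro cs
  induction cs with
  | nil => intro _; simp
  | cons c t ih =>
    intro hpw
    rw [List.pairwise_cons] at hpw
    rw [List.flatMap_cons, List.pairwise_append]
    refine ⟨?_, ih hpw.2, ?_⟩
    · refine List.pairwise_map.mpr ((hG c).imp (fun hab => ?_))
      rw [Prod.Lex.lt_iff]
      exact Or.inr ⟨rfl, hab⟩
    · intro a ha b hb
      rcases List.mem_map.mp ha with ⟨kva, _, hae⟩
      rcases List.mem_flatMap.mp hb with ⟨c', hc', hbm⟩
      rcases List.mem_map.mp hbm with ⟨kvb, _, hbe⟩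
      rw [Prod.Lex.lt_iff, ← hae, ← hbe]
      exact Or.inl (hpw.1 c' hc')

theorem pv_B_items (l : List (String × String)) (h : Pre_format_metadata_for_report l) :
    PySem.List.sorted2 (l.map (fun kv => (pvCat kv.1, kv.1, kv.2)))
        (fun t => t.1) (fun t => t.2.1)
      = (pvCats l).flatMap (fun c => (pvGroup l c).map (fun kv => (c, kv.1, kv.2))) := by
  rw [pv_sorted2_eq_sorted_lex]
  refine PySem.List.sorted_eq_of_perm_of_pairwise_lt _ _ _ ?_ ?_
  · refine List.Perm.trans
      (pv_flatMap_perm _ _ _ (fun c _ => List.Perm.map _ (PySem.List.sorted_perm _ _ _))) ?_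
    simp only [pv_map_filter_triple]
    rw [← List.map_flatMap]
    refine List.Perm.map _ ?_
    refine pv_partition_perm (fun kv => pvCat kv.1) (pvCats l) l
      ((pvCats_pairwise l).imp (fun hab => ne_of_lt hab)) ?_
    intro kv hkv
    rw [pvCats, PySem.List.mem_sorted, PySem.Set.mem_ofList]
    exact List.mem_map_of_mem hkv
  · exact pv_flat_pairwise (pvGroup l) (pv_group_pairwise_lt l h) (pvCats l) (pvCats_pairwise l)

theorem pv_foldB_block (kvs : List (String × String)) (c : String) (out : String) :
    (kvs.map (fun kv => (c, kv.1, kv.2))).foldl pvStep (out, some c) = (out ++ pvLines kvs, some c) := by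
  induction kvs generalizing out with
  | nil => simp [pvLines]
  | cons kv t ih =>
    simp only [List.map_cons, List.foldl_cons]
    have h1 : pvStep (out, some c) (c, kv.1, kv.2) = (out ++ pvLine kv.1 kv.2, some c) := by
      simp [pvStep]
    rw [h1, ih, pvLines_cons]
    simp [String.append_assoc]

theorem pv_foldB_chain (G : String → List (String × String)) :
    ∀ (cs : List String), cs.Pairwise (· ≠ ·) → (∀ c ∈ cs, G c ≠ []) →
    ∀ (out : String) (c0 : String), (∀ c ∈ cs, c0 ≠ c) →
    (cs.flatMap (fun c => (G c).map (fun kv => (c, kv.1, kv.2)))).foldl pvStep (out, some c0)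
      = (out ++ pvBr (cs.map (fun c => (c, G c))), some (cs.getLastD c0)) := by
  intro cs
  induction cs with
  | nil => intro _ _ out c0 _; simp [pvBr]
  | cons c t ih =>
    intro hpw hne out c0 hc0
    rw [List.pairwise_cons] at hpw
    obtain ⟨kv, kvs, hG⟩ : ∃ kv kvs, G c = kv :: kvs := by
      cases hGc : G c with
      | nil => exact absurd hGc (hne c (by simp))
      | cons kv kvs => exact ⟨kv, kvs, rfl⟩
    rw [List.flatMap_cons, List.foldl_append, hG, List.map_cons, List.foldl_cons]
    have h1 : pvStep (out, some c0) (c, kv.1, kv.2)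
        = (((out ++ "\n") ++ pvHeader c) ++ pvLine kv.1 kv.2, some c) := by
      simp [pvStep, hc0 c (by simp)]
    rw [h1, pv_foldB_block kvs c, ih hpw.2 (fun c' h' => hne c' (by simp [h'])) _ c
      (fun c' h' => hpw.1 c' h')]
    rw [List.map_cons, List.getLastD_cons]
    show (_, _) = (_, _)
    simp only [pvBr, hG, pvLines_cons]
    rw [Prod.mk.injEq]
    exact ⟨by simp [String.append_assoc], rfl⟩

theorem pv_B_eq (l : List (String × String)) (h : Pre_format_metadata_for_report l) :
    format_metadata_for_report_alt l
      = match (pvCats l).map (fun c => (c, pvGroup l c)) with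
        | [] => ""
        | (c, kvs) :: t => pvHeader c ++ pvLines kvs ++ pvBr t ++ "\n" := by
  show (if ((PySem.List.sorted2 (l.map (fun kv => (pvCat kv.1, kv.1, kv.2)))
        (fun t => t.1) (fun t => t.2.1)).foldl pvStep ("", none)).2 = none
      then ((PySem.List.sorted2 (l.map (fun kv => (pvCat kv.1, kv.1, kv.2)))
        (fun t => t.1) (fun t => t.2.1)).foldl pvStep ("", none)).1
      else ((PySem.List.sorted2 (l.map (fun kv => (pvCat kv.1, kv.1, kv.2)))
        (fun t => t.1) (fun t => t.2.1)).foldl pvStep ("", none)).1 ++ "\n") = _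
  rw [pv_B_items l h]
  cases hcs : pvCats l with
  | nil => simp
  | cons c t =>
    have hpwc : (c :: t).Pairwise (· < ·) := hcs ▸ pvCats_pairwise l
    rw [List.pairwise_cons] at hpwc
    obtain ⟨kv, kvs, hG⟩ : ∃ kv kvs, pvGroup l c = kv :: kvs := by
      cases hGc : pvGroup l c with
      | nil => exact absurd hGc (pv_group_ne_nil l c (by rw [hcs]; exact List.mem_cons_self))
      | cons kv kvs => exact ⟨kv, kvs, rfl⟩
    rw [List.flatMap_cons, List.foldl_append, hG, List.map_cons, List.foldl_cons]
    have h1 : pvStep ("", none) (c, kv.1, kv.2)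
        = (("" ++ pvHeader c) ++ pvLine kv.1 kv.2, some c) := by
      simp [pvStep]
    rw [h1, pv_foldB_block kvs c,
      pv_foldB_chain (pvGroup l) t (hpwc.2.imp (fun hab => ne_of_lt hab))
        (fun c' h' => pv_group_ne_nil l c' (by rw [hcs]; exact List.mem_cons_of_mem _ h'))
        _ c (fun c' h' => ne_of_lt (hpwc.1 c' h'))]
    simp only [List.map_cons]
    rw [if_neg (by simp)]
    show (((("" ++ pvHeader c) ++ pvLine kv.1 kv.2) ++ pvLines kvs) ++ pvBr (t.map (fun c => (c, pvGroup l c)))) ++ "\n" = _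
    rw [hG, pvLines_cons]
    simp [String.append_assoc]

theorem pv_Ar_shift (t : List (String × List (String × String))) :
    "\n" ++ pvAr t = pvBr t ++ "\n" := by
  induction t with
  | nil => simp [pvAr, pvBr]
  | cons g t ih =>
    obtain ⟨c, kvs⟩ := g
    simp only [pvAr, pvBr]
    rw [← String.append_assoc, ← String.append_assoc, ← String.append_assoc]
    rw [String.append_assoc (s₁ := "\n" ++ pvHeader c ++ pvLines kvs), ih]
    simp [String.append_assoc]

-- ===== VERDICT (by name: the statement is the Claim_ definition above) =====
theorem format_metadata_for_report_spec : Claim_equal_format_metadata_for_report := by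
  intro l _ hpre
  show format_metadata_for_report l = format_metadata_for_report_alt l
  rw [pv_A_eq_Ar l hpre, pv_B_eq l hpre]
  cases hgs : (pvCats l).map (fun c => (c, pvGroup l c)) with
  | nil => simp [pvAr]
  | cons g t =>
      obtain ⟨c, kvs⟩ := g
      show pvAr _ = _
      simp only [pvAr]
      rw [String.append_assoc (s₁ := pvHeader c ++ pvLines kvs), pv_Ar_shift, ← String.append_assoc]
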